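-- pv_equiv track=rewrite | github.com/andy1li/codejam | 2021/Qualification/C. Reversort Engineering/2021-q-c.py | solve
-- ===== SOURCE A (Python) =====
-- from itertools import count
--
-- def solve(n, cost):
--     def check(i, j):
--         return i+1 <= cost-j <= (n*(n+1) - (n-i)*(n-(i+1))) // 2
--
--     A, i = [*range(1, n+1)], n-2
--     if not check(i, 0): return 'IMPOSSIBLE'
--
--     while cost and i > -1:
--         c = next(j for j in count(1) if check(i-1, j))
--         A[i:i+c] = reversed(A[i:i+c])
--         cost -= c
--         i -= 1
--
--     return ' '.join(map(str, A))
-- ===== SOURCE B (Python) =====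
-- def solve(n, cost):
--     # Feasibility: Reversort cost lies in [n-1, n(n+1)/2 - 1].
--     if not (n - 1 <= cost <= n * (n + 1) // 2 - 1):
--         return 'IMPOSSIBLE'
--     A = list(range(1, n + 1))
--     for i in range(n - 2, -1, -1):
--         # max cost the remaining steps 0..i-1 can still absorb
--         upper = (n * (n + 1) - (n - i + 1) * (n - i)) // 2
--         c = max(1, cost - upper)
--         A[i:i + c] = A[i:i + c][::-1]
--         cost -= c
--     return ' '.join(map(str, A))
-- ===== Notes on version B (the rewrite author's own statement) =====
-- stated objective: faster
-- what changed: B replaces A's per-step generator search (next over itertools.count) for the reversal length by its closed form c = max(1, cost - upper) and A's while-loop with mutable index by a for-loop over range(n-2,-1,-1), after a direct closed-form feasibility range check.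
import Mathlib
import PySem

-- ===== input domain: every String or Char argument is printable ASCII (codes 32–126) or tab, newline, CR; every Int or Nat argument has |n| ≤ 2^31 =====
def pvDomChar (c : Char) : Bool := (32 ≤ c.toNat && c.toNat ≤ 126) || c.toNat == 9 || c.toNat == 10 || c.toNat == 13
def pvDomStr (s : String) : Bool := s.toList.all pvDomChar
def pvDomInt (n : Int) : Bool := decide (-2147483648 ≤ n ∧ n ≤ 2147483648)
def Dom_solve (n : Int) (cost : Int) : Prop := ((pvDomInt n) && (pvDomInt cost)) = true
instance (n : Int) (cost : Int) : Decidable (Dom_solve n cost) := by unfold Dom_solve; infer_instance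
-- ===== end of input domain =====

-- B replaces A's per-step generator search for the reversal length by its closed form
-- c = max(1, cost - upper) and the while-loop by a for-loop; same return values everywhere.

-- ===== PORT A =====

-- check(i, j) of A: i+1 <= cost-j <= (n*(n+1) - (n-i)*(n-(i+1))) // 2
def solveCheck (n cost i j : Int) : Bool :=
  decide (i + 1 ≤ cost - j) && decide (cost - j ≤ PySem.Int.floordiv (n * (n + 1) - (n - i) * (n - (i + 1))) 2)

-- next(j for j in count(1) if check(i-1, j)): linear search from j upward; the fuel
-- only makes the search total (on every state A reaches, the j found lies within it).
def solveFindC (n cost i : Int) : Nat → Int → Int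
  | 0, j => j
  | f + 1, j => if solveCheck n cost (i - 1) j then j else solveFindC n cost i f (j + 1)

-- the while-loop; fuel only bounds the iteration count (i strictly decreases, so
-- n-1 iterations always suffice).  Slice assignment A[i:i+c] = reversed(A[i:i+c]) is
-- exact as take/reverse-slice/drop since here 0 ≤ i and 1 ≤ c.
def solveLoop (n : Int) : Nat → Int → Int → List Int → List Int
  | 0, _, _, A => A
  | f + 1, cost, i, A =>
    if cost ≠ 0 ∧ -1 < i then
      let c := solveFindC n cost i ((cost - i).toNat + 1) 1
      let A' := A.take i.toNat ++ (PySem.List.slice A (some i) (some (i + c))).reverse ++ A.drop (i + c).toNat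
      solveLoop n f (cost - c) (i - 1) A'
    else A

def solve (n : Int) (cost : Int) : String :=
  if !(solveCheck n cost (n - 2) 0) then "IMPOSSIBLE"
  else
    PySem.Str.join " " ((solveLoop n (n - 1).toNat cost (n - 2) (PySem.List.pyRange 1 (n + 1) 1)).map PySem.Int.toStr)

-- ===== PORT B =====

-- body of B's for-loop: closed-form c = max(1, cost - upper); the slice assignment
-- is exact as take/reverse-slice/drop since 0 ≤ i and 1 ≤ c.
def solveStepB (n : Int) (st : List Int × Int) (i : Int) : List Int × Int :=
  let upper := PySem.Int.floordiv (n * (n + 1) - (n - i + 1) * (n - i)) 2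
  let c := max 1 (st.2 - upper)
  (st.1.take i.toNat ++ (PySem.List.slice st.1 (some i) (some (i + c))).reverse ++ st.1.drop (i + c).toNat,
   st.2 - c)

def solve_alt (n : Int) (cost : Int) : String :=
  if !(decide (n - 1 ≤ cost) && decide (cost ≤ PySem.Int.floordiv (n * (n + 1)) 2 - 1)) then "IMPOSSIBLE"
  else
    let A0 := PySem.List.pyRange 1 (n + 1) 1
    let res := (PySem.List.pyRange (n - 2) (-1) (-1)).foldl (solveStepB n) (A0, cost)
    PySem.Str.join " " (res.1.map PySem.Int.toStr)

-- ===== PRECONDITION & SPEC =====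
def Spec_solve (n : Int) (cost : Int) (out : String) : Prop := out = solve_alt n cost
instance (n : Int) (cost : Int) (out : String) : Decidable (Spec_solve n cost out) := by unfold Spec_solve; infer_instance

-- ===== CLAIM (what is proved, stated in full; the proofs are below) =====
def Claim_equal_solve : Prop := ∀ (n : Int) (cost : Int), Dom_solve n cost → Spec_solve n cost (solve n cost)

-- ===== LEMMAS AND PROOFS =====

-- the "upper" bound A's check compares against, as a function of i
def pvU (n i : Int) : Int := PySem.Int.floordiv (n * (n + 1) - (n - i) * (n - (i + 1))) 2

-- remaining cost of A's loop when about to process index i (closed form)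
def pvG (n cost i : Int) : Int := min (cost - (n - 2 - i)) (pvU n i)

theorem pvU_base (n : Int) : pvU n (-1) = 0 := by
  unfold pvU
  have h : n * (n + 1) - (n - -1) * (n - (-1 + 1)) = 0 := by ring
  rw [h]
  decide

theorem floordiv_two_shift (a k : Int) :
    PySem.Int.floordiv (a + 2 * k) 2 = PySem.Int.floordiv a 2 + k := by
  rw [PySem.Int.floordiv_eq_ediv_of_pos (by omega), PySem.Int.floordiv_eq_ediv_of_pos (by omega)]
  omega

theorem pvU_step (n i : Int) : pvU n i = pvU n (i - 1) + (n - i) := by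
  have h : n * (n + 1) - (n - i) * (n - (i + 1)) =
      (n * (n + 1) - (n - (i - 1)) * (n - ((i - 1) + 1))) + 2 * (n - i) := by ring
  unfold pvU
  rw [h, floordiv_two_shift]

theorem pvU_ge (n : Int) (k : Nat) (hk : (k : Int) ≤ n) : (k : Int) ≤ pvU n ((k : Int) - 1) := by
  induction k with
  | zero => simp [pvU_base]
  | succ m ih =>
      have h1 : pvU n (m : Int) = pvU n ((m : Int) - 1) + (n - m) := pvU_step n m
      have h2 : (m : Int) ≤ pvU n ((m : Int) - 1) := ih (by push_cast at hk ⊢; omega)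
      push_cast at hk ⊢
      have : ((m : Int) + 1) - 1 = (m : Int) := by ring
      rw [this, h1]
      omega

theorem solveCheck_eq (n cost i j : Int) :
    solveCheck n cost i j = true ↔ (i + 1 ≤ cost - j ∧ cost - j ≤ pvU n i) := by
  unfold solveCheck pvU
  simp

-- A's generator search returns max 1 (cost - pvU n (i-1)) when that value is attainable
theorem solveFindC_eq (n cost i : Int) (m : Int)
    (hm : m = max 1 (cost - pvU n (i - 1))) (hle : m ≤ cost - i) :
    ∀ (f : Nat) (j : Int), 1 ≤ j → j ≤ m → m < j + f → solveFindC n cost i f j = m := by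
  intro f
  induction f with
  | zero => intro j _ h2 h3; omega
  | succ f ih =>
      intro j h1 h2 h3
      unfold solveFindC
      rcases eq_or_lt_of_le h2 with heq | hlt
      · subst heq
        have : solveCheck n cost (i - 1) j = true := by
          rw [solveCheck_eq]
          constructor
          · omega
          · have : cost - pvU n (i - 1) ≤ j := by omega
            omega
        simp [this]
      · have : solveCheck n cost (i - 1) j = false := by
          rw [Bool.eq_false_iff, Ne, solveCheck_eq]
          intro ⟨_, hb⟩
          -- j < m and j ≥ 1 forces m = cost - pvU n (i-1) > j, so cost - j > pvU n (i-1)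
          omega
        simp [this]
        exact ih (j + 1) (by omega) (by omega) (by omega)

-- the loop equivalence: A's while-loop from state (pvG n cost i, i) equals B's fold
-- over range(i, -1, -1), for feasible (n, cost)
theorem loop_eq (n cost : Int) (hlo : n - 1 ≤ cost) :
    ∀ (k : Nat), (k : Int) ≤ n - 1 → ∀ (A : List Int) (f : Nat), k ≤ f →
      solveLoop n f (pvG n cost ((k : Int) - 1)) ((k : Int) - 1) A =
        ((PySem.List.pyRange ((k : Int) - 1) (-1) (-1)).foldl (solveStepB n) (A, pvG n cost ((k : Int) - 1))).1 := by
  intro k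
  induction k with
  | zero =>
      intro _ A f _
      have hnil : PySem.List.pyRange ((0 : Int) - 1) (-1) (-1) = [] :=
        PySem.List.pyRange_neg_one_eq_nil (by norm_num)
      cases f with
      | zero => simp [solveLoop]
      | succ f =>
          simp only [solveLoop]
          norm_num
  | succ k ih =>
      intro hk A f hf
      have hi : ((k : Int) + 1) - 1 = (k : Int) := by ring
      push_cast
      rw [hi]
      obtain ⟨f', rfl⟩ : ∃ f', f = f' + 1 := ⟨f - 1, by omega⟩
      have hkn : (k : Int) ≤ n - 2 := by push_cast at hk; omega
      have hUk1 : (k : Int) ≤ pvU n ((k : Int) - 1) := pvU_ge n k (by omega)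
      have hUstep : pvU n (k : Int) = pvU n ((k : Int) - 1) + (n - (k : Int)) := pvU_step n k
      -- abbreviations
      set x : Int := cost - (n - 2 - (k : Int)) with hx
      have hgk : pvG n cost (k : Int) = min x (pvU n (k : Int)) := by unfold pvG; rw [hx]
      have hgk1 : pvG n cost ((k : Int) - 1) = min (x - 1) (pvU n ((k : Int) - 1)) := by
        unfold pvG; rw [hx]; ring_nf
      have hxk : (k : Int) + 1 ≤ x := by omega
      have hgpos : (k : Int) + 1 ≤ pvG n cost (k : Int) := by
        rw [hgk]; omega
      -- value of the found c
      set m : Int := max 1 (pvG n cost (k : Int) - pvU n ((k : Int) - 1)) with hmdef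
      have hmle : m ≤ pvG n cost (k : Int) - (k : Int) := by
        rw [hgk] at hmdef ⊢; omega
      have hfind : solveFindC n (pvG n cost (k : Int)) (k : Int)
          ((pvG n cost (k : Int) - (k : Int)).toNat + 1) 1 = m := by
        apply solveFindC_eq n (pvG n cost (k : Int)) (k : Int) m hmdef hmle
        · omega
        · omega
        · omega
      have hmg : pvG n cost (k : Int) - m = pvG n cost ((k : Int) - 1) := by
        rw [hgk1, hgk] at *
        omega
      -- unfold one step of A's loop
      rw [solveLoop]
      have hguard : pvG n cost (k : Int) ≠ 0 ∧ -1 < (k : Int) := by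
        constructor
        · omega
        · omega
      rw [if_pos hguard]
      simp only [hfind]
      -- unfold one step of B's fold
      have hcons : PySem.List.pyRange (k : Int) (-1) (-1) = (k : Int) :: PySem.List.pyRange ((k : Int) - 1) (-1) (-1) :=
        PySem.List.pyRange_neg_one_cons (by omega)
      rw [hcons, List.foldl_cons]
      -- B's step computes the same c and the same next state
      have hstep : solveStepB n (A, pvG n cost (k : Int)) (k : Int) =
          (A.take (k : Int).toNat ++
             (PySem.List.slice A (some (k : Int)) (some ((k : Int) + m))).reverse ++
             A.drop ((k : Int) + m).toNat,
           pvG n cost ((k : Int) - 1)) := by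
        unfold solveStepB
        have hUeq : PySem.Int.floordiv (n * (n + 1) - (n - (k : Int) + 1) * (n - (k : Int))) 2 =
            pvU n ((k : Int) - 1) := by
          unfold pvU
          congr 1
          ring
        simp only [hUeq]
        rw [← hmdef, hmg]
      rw [hstep, hmg]
      exact ih (by push_cast at hk ⊢; omega) _ f' (by omega)

-- the two feasibility tests agree
theorem guard_eq (n cost : Int) :
    solveCheck n cost (n - 2) 0 =
      (decide (n - 1 ≤ cost) && decide (cost ≤ PySem.Int.floordiv (n * (n + 1)) 2 - 1)) := by
  have h1 : n * (n + 1) - (n - (n - 2)) * (n - (n - 2 + 1)) = n * (n + 1) + 2 * (-1) := by ring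
  unfold solveCheck
  rw [h1, floordiv_two_shift]
  have h2 : n - 2 + 1 = n - 1 := by ring
  rw [h2]
  congr 1 <;> simp

-- ===== VERDICT (by name: the statement is the Claim_ definition above) =====
theorem solve_spec : Claim_equal_solve := by
  intro n cost _
  unfold Spec_solve solve solve_alt
  rw [guard_eq]
  by_cases hfeas : (n - 1 ≤ cost ∧ cost ≤ PySem.Int.floordiv (n * (n + 1)) 2 - 1)
  · have hb : (decide (n - 1 ≤ cost) && decide (cost ≤ PySem.Int.floordiv (n * (n + 1)) 2 - 1)) = true := by
      simp only [Bool.and_eq_true, decide_eq_true_eq]; exact hfeas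
    rw [hb, Bool.not_true]
    simp only [Bool.false_eq_true, if_false]
    by_cases hn : 2 ≤ n
    · -- the interesting case: run the loops
      have hhi : cost ≤ pvU n (n - 2) := by
        have h1 : n * (n + 1) - (n - (n - 2)) * (n - (n - 2 + 1)) = n * (n + 1) + 2 * (-1) := by ring
        unfold pvU
        rw [h1, floordiv_two_shift]
        omega
      have hcast : ((n - 1).toNat : Int) = n - 1 := by omega
      have := loop_eq n cost hfeas.1 (n - 1).toNat (by omega)
        (PySem.List.pyRange 1 (n + 1) 1) (n - 1).toNat (le_refl _)
      rw [hcast] at this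
      have hg : pvG n cost (n - 1 - 1) = cost := by
        unfold pvG
        have : n - 1 - 1 = n - 2 := by ring
        rw [this]
        omega
      rw [hg] at this
      have hidx : n - 1 - 1 = n - 2 := by ring
      rw [hidx] at this
      rw [this]
    · -- n ≤ 1: A's loop does nothing (fuel 0) and B's range is empty
      have hfuel : (n - 1).toNat = 0 := by omega
      have hnil : PySem.List.pyRange (n - 2) (-1) (-1) = [] :=
        PySem.List.pyRange_neg_one_eq_nil (by omega)
      rw [hfuel, hnil]
      simp [solveLoop]
  · have hb : (decide (n - 1 ≤ cost) && decide (cost ≤ PySem.Int.floordiv (n * (n + 1)) 2 - 1)) = false := by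
      rw [Bool.eq_false_iff]
      simp only [ne_eq, Bool.and_eq_true, decide_eq_true_eq]
      exact hfeas
    rw [hb, Bool.not_false]
    simp only [if_true]
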